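-- pv_equiv track=rewrite | github.com/gauthierbizzarri/TowerDefense | wave_defense.py | generate_mat
-- ===== SOURCE A (Python) =====
-- def generate_mat(rows, lines):
--     #
--     mat = [[0 for _ in range(rows)] for _ in range(lines)]
--     for r in range(rows):
--         for l in range(lines):
--             if r < 6 or rows - r < 6:
--                 mat[l][r] = -1
--             if r == 20 and l == 10:
--                 mat[l][r] = 3
--     return mat
-- ===== SOURCE B (Python) =====
-- def generate_mat(rows, lines):
--     # Block construction: rows [-1-block][0-block][-1-block] by width arithmetic,
--     # plus one separately built special row when cell (10,20) is reachable.
--     left = min(6, max(rows, 0))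
--     rstart = max(left, rows - 5)
--     base = [-1] * left + [0] * (rstart - left) + [-1] * (rows - rstart)
--     if rows > 20 and lines > 10:
--         special = base[:20] + [3] + base[21:]
--         return [list(base) for _ in range(10)] + [special] + [list(base) for _ in range(lines - 11)]
--     return [list(base) for _ in range(max(lines, 0))]
-- ===== Notes on version B (the rewrite author's own statement) =====
-- stated objective: alternative
-- what changed: B builds each row by arithmetic block widths ([-1]*left + [0]*mid + [-1]*right) and assembles the matrix as replicated-rows ++ [one separately spliced special row] ++ replicated-rows, instead of A's per-cell nested update loops with predicates.
import Mathlib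
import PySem

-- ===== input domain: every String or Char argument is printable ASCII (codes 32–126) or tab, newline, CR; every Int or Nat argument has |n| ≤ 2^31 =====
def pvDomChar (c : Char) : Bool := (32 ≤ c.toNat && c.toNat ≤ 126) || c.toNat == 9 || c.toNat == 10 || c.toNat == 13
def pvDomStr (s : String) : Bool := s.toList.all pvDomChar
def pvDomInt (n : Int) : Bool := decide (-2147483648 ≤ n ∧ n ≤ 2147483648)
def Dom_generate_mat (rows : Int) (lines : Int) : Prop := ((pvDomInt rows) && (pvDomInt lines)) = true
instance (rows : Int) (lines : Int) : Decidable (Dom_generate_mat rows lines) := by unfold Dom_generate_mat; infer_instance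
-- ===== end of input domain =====

-- B builds rows by block widths and splices one special row; A updates per cell in nested loops (return-value equivalence).

-- ===== PORT A =====
-- the inner-loop body: mat[l][r] = -1 if border; mat[l][r] = 3 if (r,l) = (20,10).
-- loop indices l, r come from range() so they are ≥ 0 and in bounds: List.set/getD on
-- l.toNat / r.toNat is exact Python list assignment here (out-of-range never occurs).
def pvBodyA (rows : Int) (r : Int) (mat : List (List Int)) (l : Int) : List (List Int) :=
  let mat := if r < 6 ∨ rows - r < 6 then
      mat.set l.toNat ((mat.getD l.toNat []).set r.toNat (-1)) else mat
  if r = 20 ∧ l = 10 then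
      mat.set l.toNat ((mat.getD l.toNat []).set r.toNat 3) else mat

def generate_mat (rows : Int) (lines : Int) : List (List Int) :=
  let mat := (PySem.List.pyRange 0 lines 1).map (fun _ => (PySem.List.pyRange 0 rows 1).map (fun _ => (0 : Int)))
  (PySem.List.pyRange 0 rows 1).foldl (fun mat r =>
    (PySem.List.pyRange 0 lines 1).foldl (pvBodyA rows r) mat) mat

-- ===== PORT B =====
-- base[:20] / base[21:] with nonnegative bounds are exactly List.take / List.drop.
def generate_mat_alt (rows : Int) (lines : Int) : List (List Int) :=
  let left := min 6 (max rows 0)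
  let rstart := max left (rows - 5)
  let base := List.replicate left.toNat (-1) ++ List.replicate (rstart - left).toNat 0
      ++ List.replicate (rows - rstart).toNat (-1)
  if rows > 20 ∧ lines > 10 then
    let special := base.take 20 ++ [3] ++ base.drop 21
    List.replicate 10 base ++ [special] ++ List.replicate (lines - 11).toNat base
  else
    List.replicate (max lines 0).toNat base

-- ===== PRECONDITION & SPEC =====
def Spec_generate_mat (rows : Int) (lines : Int) (out : List (List Int)) : Prop := out = generate_mat_alt rows lines
instance (rows : Int) (lines : Int) (out : List (List Int)) : Decidable (Spec_generate_mat rows lines out) := by unfold Spec_generate_mat; infer_instance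

-- ===== CLAIM (what is proved, stated in full; the proofs are below) =====
def Claim_equal_generate_mat : Prop := ∀ (rows : Int) (lines : Int), Dom_generate_mat rows lines → Spec_generate_mat rows lines (generate_mat rows lines)

-- ===== LEMMAS AND PROOFS =====

-- the final value of cell (l=i, r=j) (indices as Int) in A's matrix
def pvCell (rows : Int) (i j : Int) : Int :=
  if j = 20 ∧ i = 10 then 3 else if j < 6 ∨ rows - j < 6 then -1 else 0

-- effect of A's two conditional assignments on one row (row l = i, column r)
def pvStepRow (rows r : Int) (i : Int) (row : List Int) : List Int :=
  let row := if r < 6 ∨ rows - r < 6 then row.set r.toNat (-1) else row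
  if r = 20 ∧ i = 10 then row.set r.toNat 3 else row

theorem pv_set_getD_self (mat : List (List Int)) (k : Nat) :
    mat.set k (mat.getD k []) = mat := by
  rcases Nat.lt_or_ge k mat.length with h | h
  · rw [List.getD_eq_getElem _ _ h]; exact List.set_getElem_self h
  · rw [List.set_eq_of_length_le h]

theorem pv_getD_set_self (mat : List (List Int)) (k : Nat) (x : List Int) (h : k < mat.length) :
    (mat.set k x).getD k [] = x := by
  simp [List.getD_eq_getElem?_getD, h]

theorem pvBodyA_eq (rows r : Int) (mat : List (List Int)) (l : Int) :
    pvBodyA rows r mat l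
      = mat.set l.toNat (pvStepRow rows r l (mat.getD l.toNat [])) := by
  unfold pvBodyA pvStepRow
  rcases Nat.lt_or_ge l.toNat mat.length with h | h
  · have hm1 : (if r < 6 ∨ rows - r < 6 then
        mat.set l.toNat ((mat.getD l.toNat []).set r.toNat (-1)) else mat).getD l.toNat []
        = (if r < 6 ∨ rows - r < 6 then (mat.getD l.toNat []).set r.toNat (-1) else mat.getD l.toNat []) := by
      split_ifs with hb
      · exact pv_getD_set_self _ _ _ h
      · rfl
    have hm2 : ∀ x : List Int, (if r < 6 ∨ rows - r < 6 then
        mat.set l.toNat ((mat.getD l.toNat []).set r.toNat (-1)) else mat).set l.toNat x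
        = mat.set l.toNat x := by
      intro x; split_ifs with hb
      · exact List.set_set ..
      · rfl
    by_cases hs : r = 20 ∧ l = 10
    · simp only [if_pos hs]; rw [hm1] at *; rw [hm2]
    · simp only [if_neg hs]
      split_ifs with hb
      · rfl
      · exact (pv_set_getD_self mat l.toNat).symm
  · have hset : ∀ x : List Int, mat.set l.toNat x = mat := fun x => List.set_eq_of_length_le h
    split_ifs <;> simp [hset]

theorem pv_inner (rows r b : Int) :
    ∀ (n : Nat) (a : Int), 0 ≤ a → (b - a).toNat = n → ∀ (mat : List (List Int)),
    (PySem.List.pyRange a b 1).foldl (pvBodyA rows r) mat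
      = mat.mapIdx (fun i row => if a ≤ (i : Int) ∧ (i : Int) < b then pvStepRow rows r i row else row) := by
  intro n
  induction n with
  | zero =>
    intro a ha h0 mat
    rw [PySem.List.pyRange_one_eq_nil (by omega)]
    apply List.ext_getElem (by simp)
    intro i h1 h2
    simp only [List.foldl_nil, List.getElem_mapIdx]
    rw [if_neg (by omega)]
  | succ n ih =>
    intro a ha hn mat
    rw [PySem.List.pyRange_one_cons (by omega), List.foldl_cons, pvBodyA_eq,
      ih (a + 1) (by omega) (by omega)]
    apply List.ext_getElem (by simp)
    intro i h1 h2
    simp only [List.getElem_mapIdx, List.getElem_set]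
    by_cases hia : i = a.toNat
    · subst hia
      rw [if_pos rfl, if_neg (by omega), if_pos (by omega),
        List.getD_eq_getElem mat [] (by simpa using h2)]
      congr 1
      omega
    · rw [if_neg (Ne.symm hia)]
      have : ((a + 1 ≤ (i : Int) ∧ (i : Int) < b) ↔ (a ≤ (i : Int) ∧ (i : Int) < b)) := by omega
      simp only [this]

theorem pv_outer (rows lines : Int) :
    ∀ (n : Nat) (a : Int), 0 ≤ a → (rows - a).toNat = n → ∀ (mat : List (List Int)),
    (PySem.List.pyRange a rows 1).foldl (fun mat r =>
        (PySem.List.pyRange 0 lines 1).foldl (pvBodyA rows r) mat) mat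
      = mat.mapIdx (fun i row => if (i : Int) < lines then
          (PySem.List.pyRange a rows 1).foldl (fun row r => pvStepRow rows r i row) row else row) := by
  intro n
  induction n with
  | zero =>
    intro a ha h0 mat
    rw [PySem.List.pyRange_one_eq_nil (a := a) (b := rows) (by omega)]
    simp only [List.foldl_nil, ite_self]
    apply List.ext_getElem (by simp)
    intro i h1 h2
    simp [List.getElem_mapIdx]
  | succ n ih =>
    intro a ha hn mat
    rw [PySem.List.pyRange_one_cons (a := a) (b := rows) (by omega), List.foldl_cons,
      pv_inner rows a lines (lines - 0).toNat 0 le_rfl rfl,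
      ih (a + 1) (by omega) (by omega)]
    apply List.ext_getElem (by simp)
    intro i h1 h2
    simp only [List.getElem_mapIdx, List.foldl_cons]
    by_cases hi : (i : Int) < lines
    · rw [if_pos (show (0 : Int) ≤ (i : Int) ∧ (i : Int) < lines from ⟨by omega, hi⟩),
        if_pos hi, if_pos hi]
    · rw [if_neg hi, if_neg hi, if_neg (show ¬((0 : Int) ≤ (i : Int) ∧ (i : Int) < lines) from fun h => hi h.2)]

theorem pvStepRow_length (rows r i : Int) (row : List Int) :
    (pvStepRow rows r i row).length = row.length := by
  unfold pvStepRow; split_ifs <;> simp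

theorem pvStepRow_getElem (rows r i : Int) (hr0 : 0 ≤ r) (row : List Int) (j : Nat) (hj : j < row.length) :
    (pvStepRow rows r i row)[j]'(by rw [pvStepRow_length]; exact hj)
      = if (j : Int) = r then
          (if r = 20 ∧ i = 10 then 3 else if r < 6 ∨ rows - r < 6 then -1 else row[j])
        else row[j] := by
  unfold pvStepRow
  split_ifs <;> simp only [List.getElem_set] <;> split_ifs <;> first | rfl | omega

theorem pv_rowfold (rows : Int) (i : Int) :
    ∀ (n : Nat) (a : Int), 0 ≤ a → (rows - a).toNat = n → ∀ (row : List Int),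
    (PySem.List.pyRange a rows 1).foldl (fun row r => pvStepRow rows r i row) row
      = row.mapIdx (fun j v => if a ≤ (j : Int) ∧ (j : Int) < rows then
          (if (j : Int) = 20 ∧ i = 10 then 3 else if (j : Int) < 6 ∨ rows - (j : Int) < 6 then -1 else v) else v) := by
  intro n
  induction n with
  | zero =>
    intro a ha h0 row
    rw [PySem.List.pyRange_one_eq_nil (a := a) (b := rows) (by omega)]
    apply List.ext_getElem (by simp)
    intro j h1 h2
    simp only [List.foldl_nil, List.getElem_mapIdx]
    rw [if_neg (by omega)]
  | succ n ih =>
    intro a ha hn row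
    rw [PySem.List.pyRange_one_cons (a := a) (b := rows) (by omega), List.foldl_cons,
      ih (a + 1) (by omega) (by omega)]
    apply List.ext_getElem (by simp [pvStepRow_length])
    intro j h1 h2
    have hjr : j < row.length := by simpa using h2
    simp only [List.getElem_mapIdx]
    rw [pvStepRow_getElem rows a i ha row j hjr]
    split_ifs <;> first | rfl | omega

-- canonical form of A's result
theorem pvA_canon (rows lines : Int) :
    generate_mat rows lines
      = (List.range lines.toNat).map (fun (i : Nat) => (List.range rows.toNat).map (fun (j : Nat) => pvCell rows (i : Int) (j : Int))) := by
  simp only [generate_mat]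
  rw [pv_outer rows lines (rows - 0).toNat 0 le_rfl rfl]
  apply List.ext_getElem (by simp [PySem.List.length_pyRange_one])
  intro i h1 h2
  have hi : i < lines.toNat := by simpa using h2
  simp only [List.getElem_mapIdx, List.getElem_map, List.getElem_range]
  rw [if_pos (show ((i : Int) < lines) by omega),
    pv_rowfold rows i (rows - 0).toNat 0 le_rfl rfl]
  apply List.ext_getElem (by simp [PySem.List.length_pyRange_one])
  intro j h3 h4
  have hj : j < rows.toNat := by simpa using h4
  simp only [List.getElem_mapIdx, List.getElem_map, List.getElem_range, pvCell]
  split_ifs <;> first | rfl | omega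

-- B's base row in canonical form
theorem pv_base_canon (rows : Int) :
    (List.replicate (min 6 (max rows 0)).toNat (-1 : Int)
      ++ List.replicate ((max (min 6 (max rows 0)) (rows - 5)) - min 6 (max rows 0)).toNat 0
      ++ List.replicate (rows - max (min 6 (max rows 0)) (rows - 5)).toNat (-1))
      = (List.range rows.toNat).map (fun (j : Nat) => if (j : Int) < 6 ∨ rows - (j : Int) < 6 then (-1 : Int) else 0) := by
  apply List.ext_getElem (by simp; omega)
  intro j h1 h2
  simp only [List.getElem_map, List.getElem_range, List.getElem_append,
    List.getElem_replicate, List.length_replicate, List.length_append]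
  split_ifs <;> omega

-- canonical form of B's result
theorem pvB_canon (rows lines : Int) :
    generate_mat_alt rows lines
      = (List.range lines.toNat).map (fun (i : Nat) => (List.range rows.toNat).map (fun (j : Nat) => pvCell rows (i : Int) (j : Int))) := by
  simp only [generate_mat_alt]
  rw [pv_base_canon]
  by_cases hc : rows > 20 ∧ lines > 10
  · rw [if_pos hc]
    apply List.ext_getElem (by simp; omega)
    intro i h1 h2
    have hi : i < lines.toNat := by simpa using h2
    simp only [List.getElem_map, List.getElem_range, List.getElem_append,
      List.getElem_replicate, List.length_replicate, List.length_append,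
      List.length_cons, List.length_nil, List.getElem_singleton]
    split_ifs with hlt hlt2
    · -- i < 10 : plain border row
      refine List.map_congr_left (fun j hj => ?_)
      simp only [pvCell]
      split_ifs <;> first | rfl | omega
    · -- i = 10 : the special row
      apply List.ext_getElem (by simp; omega)
      intro j h3 h4
      have hj : j < rows.toNat := by simpa using h4
      simp only [List.getElem_map, List.getElem_range, List.getElem_append,
        List.getElem_singleton, List.length_append, List.length_take, List.length_map,
        List.length_range, List.length_cons, List.length_nil, List.getElem_take,
        List.getElem_drop, pvCell]
      split_ifs <;> omega
    · -- i > 10 : plain border row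
      refine List.map_congr_left (fun j hj => ?_)
      simp only [pvCell]
      split_ifs <;> first | rfl | omega
  · rw [if_neg hc]
    apply List.ext_getElem (by simp; omega)
    intro i h1 h2
    have hi : i < lines.toNat := by simpa using h2
    simp only [List.getElem_replicate, List.getElem_map, List.getElem_range]
    refine List.map_congr_left (fun j hj => ?_)
    have hjm : j < rows.toNat := List.mem_range.mp hj
    simp only [pvCell]
    split_ifs <;> first | rfl | omega

-- ===== VERDICT (by name: the statement is the Claim_ definition above) =====
theorem generate_mat_spec : Claim_equal_generate_mat := by
  intro rows lines _
  unfold Spec_generate_mat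
  rw [pvA_canon, pvB_canon]
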